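-- pv_equiv track=rewrite | github.com/andrewmcloud/advent2022 | day15.py | solve
-- ===== SOURCE A (Python) =====
-- def manhattan(sensor: tuple[int, int], beacon: tuple[int, int]):
--     x, y = sensor
--     xx, yy = beacon
--     return abs(x - xx) + abs(y - yy)
--
-- def solve(coord_pairs: tuple, row: list[int], range_min: int, range_max: int, row_index: int):
--     sensor, beacon = coord_pairs
--     sensor_to_beacon = manhattan(sensor, beacon)
--     for x in range(range_min, range_max):
--         if manhattan(sensor, (x, row_index)) <= sensor_to_beacon:
--             if beacon[0] == x and beacon[1] == row_index:
--                 row[x-range_min] = 0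
--             else:
--                 row[x-range_min] = 1
--     return row
-- ===== SOURCE B (Python) =====
-- def solve(coord_pairs, row, range_min, range_max, row_index):
--     (sx, sy), (bx, by) = coord_pairs
--     half = abs(sx - bx) + abs(sy - by) - abs(sy - row_index)
--     if half < 0:
--         return row
--     lo = max(sx - half, range_min)
--     hi = min(sx + half, range_max - 1)
--     for x in range(lo, hi + 1):
--         row[x - range_min] = 0 if (bx == x and by == row_index) else 1
--     return row
-- ===== Notes on version B (the rewrite author's own statement) =====
-- stated objective: alternative
-- what changed: B computes the sensor's covered x-interval in closed form from the Manhattan half-width and iterates only over its intersection with [range_min, range_max), instead of scanning every x in the full range and testing the distance each time.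
import Mathlib
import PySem

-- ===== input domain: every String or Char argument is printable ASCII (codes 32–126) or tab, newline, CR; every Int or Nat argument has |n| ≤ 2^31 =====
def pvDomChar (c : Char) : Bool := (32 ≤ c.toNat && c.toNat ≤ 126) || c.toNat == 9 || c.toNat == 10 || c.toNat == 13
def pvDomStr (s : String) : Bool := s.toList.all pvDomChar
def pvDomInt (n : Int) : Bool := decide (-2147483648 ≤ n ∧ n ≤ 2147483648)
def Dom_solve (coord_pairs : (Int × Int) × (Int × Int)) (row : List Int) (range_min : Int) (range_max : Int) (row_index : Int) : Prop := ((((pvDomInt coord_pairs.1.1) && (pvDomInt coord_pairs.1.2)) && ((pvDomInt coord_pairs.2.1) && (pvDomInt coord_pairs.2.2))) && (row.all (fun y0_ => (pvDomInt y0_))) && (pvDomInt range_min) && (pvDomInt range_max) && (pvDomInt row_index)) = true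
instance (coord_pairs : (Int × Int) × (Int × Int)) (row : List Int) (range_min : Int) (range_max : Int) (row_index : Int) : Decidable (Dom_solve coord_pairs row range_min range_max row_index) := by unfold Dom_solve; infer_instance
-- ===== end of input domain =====

-- B replaces A's scan of the whole [range_min, range_max) range, which tests the Manhattan
-- distance at each x, by a closed-form covered interval that it fills directly. Both A and B
-- mutate `row` in place in Python; the equivalence proved here is about the returned list.

-- ===== PORT A =====
def manhattanA (sensor : Int × Int) (beacon : Int × Int) : Int :=
  |sensor.1 - beacon.1| + |sensor.2 - beacon.2|

def solve (coord_pairs : (Int × Int) × (Int × Int)) (row : List Int) (range_min : Int) (range_max : Int) (row_index : Int) : List Int :=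
  let sensor := coord_pairs.1
  let beacon := coord_pairs.2
  let sensor_to_beacon := manhattanA sensor beacon
  (PySem.List.pyRange range_min range_max 1).foldl (fun r x =>
    if manhattanA sensor (x, row_index) ≤ sensor_to_beacon then
      if beacon.1 = x ∧ beacon.2 = row_index then
        r.set (x - range_min).toNat 0
      else
        r.set (x - range_min).toNat 1
    else r) row

-- ===== PORT B =====
def solve_alt (coord_pairs : (Int × Int) × (Int × Int)) (row : List Int) (range_min : Int) (range_max : Int) (row_index : Int) : List Int :=
  let sx := coord_pairs.1.1
  let sy := coord_pairs.1.2
  let bx := coord_pairs.2.1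
  let by_ := coord_pairs.2.2
  let half := |sx - bx| + |sy - by_| - |sy - row_index|
  if half < 0 then row
  else
    let lo := max (sx - half) range_min
    let hi := min (sx + half) (range_max - 1)
    (PySem.List.pyRange lo (hi + 1) 1).foldl (fun r x =>
      r.set (x - range_min).toNat (if bx = x ∧ by_ = row_index then 0 else 1)) row

-- ===== PRECONDITION & SPEC =====
-- Pre_ excludes exactly the inputs on which the Python A raises IndexError: those where the
-- covered x-interval is nonempty and its rightmost covered cell lies at index ≥ len(row)
-- (Python B raises there too).
def Pre_solve (coord_pairs : (Int × Int) × (Int × Int)) (row : List Int) (range_min : Int) (range_max : Int) (row_index : Int) : Prop :=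
  let sx := coord_pairs.1.1
  let half := |sx - coord_pairs.2.1| + |coord_pairs.1.2 - coord_pairs.2.2| - |coord_pairs.1.2 - row_index|
  half < 0 ∨ min (sx + half) (range_max - 1) < max (sx - half) range_min ∨
    min (sx + half) (range_max - 1) - range_min < (row.length : Int)
instance (coord_pairs : (Int × Int) × (Int × Int)) (row : List Int) (range_min : Int) (range_max : Int) (row_index : Int) : Decidable (Pre_solve coord_pairs row range_min range_max row_index) := by unfold Pre_solve; infer_instance

def pvWitness_solve : ((Int × Int) × (Int × Int)) × List Int × Int × Int × Int :=
  (((0, 0), (0, 0)), [5], 0, 1, 0)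

def Spec_solve (coord_pairs : (Int × Int) × (Int × Int)) (row : List Int) (range_min : Int) (range_max : Int) (row_index : Int) (out : List Int) : Prop := out = solve_alt coord_pairs row range_min range_max row_index
instance (coord_pairs : (Int × Int) × (Int × Int)) (row : List Int) (range_min : Int) (range_max : Int) (row_index : Int) (out : List Int) : Decidable (Spec_solve coord_pairs row range_min range_max row_index out) := by unfold Spec_solve; infer_instance

-- ===== CLAIM (what is proved, stated in full; the proofs are below) =====
def Claim_equal_solve : Prop := ∀ (coord_pairs : (Int × Int) × (Int × Int)) (row : List Int) (range_min : Int) (range_max : Int) (row_index : Int), Dom_solve coord_pairs row range_min range_max row_index → Pre_solve coord_pairs row range_min range_max row_index → Spec_solve coord_pairs row range_min range_max row_index (solve coord_pairs row range_min range_max row_index)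

-- ===== LEMMAS AND PROOFS =====

-- A guarded in-range fold over [a, b) equals the unguarded fold over the clipped interval
-- [max slo a, min (shi+1) b).
lemma fold_clip (slo shi rmin : Int) (v : Int → Int) :
    ∀ (n : Nat) (a b : Int), (b - a).toNat ≤ n → ∀ r : List Int,
      (PySem.List.pyRange a b 1).foldl
        (fun r x => if slo ≤ x ∧ x ≤ shi then r.set (x - rmin).toNat (v x) else r) r
    = (PySem.List.pyRange (max slo a) (min (shi + 1) b) 1).foldl
        (fun r x => r.set (x - rmin).toNat (v x)) r := by
  intro n
  induction n with
  | zero =>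
    intro a b h r
    rw [PySem.List.pyRange_one_eq_nil (by omega),
        PySem.List.pyRange_one_eq_nil (by omega)]
    simp only [List.foldl_nil]
  | succ n ih =>
    intro a b h r
    by_cases hab : b ≤ a
    · rw [PySem.List.pyRange_one_eq_nil hab,
          PySem.List.pyRange_one_eq_nil (by omega)]
      simp only [List.foldl_nil]
    · rw [PySem.List.pyRange_one_cons (by omega)]
      simp only [List.foldl_cons]
      by_cases hc : slo ≤ a ∧ a ≤ shi
      · rw [if_pos hc]
        have h2 : max slo a = a := by omega
        rw [h2]
        conv_rhs => rw [PySem.List.pyRange_one_cons (show a < min (shi + 1) b by omega)]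
        rw [List.foldl_cons, ih (a + 1) b (by omega)]
        have h1 : max slo (a + 1) = a + 1 := by omega
        rw [h1]
      · rw [if_neg hc, ih (a + 1) b (by omega)]
        by_cases h2a : a < slo
        · have h1 : max slo (a + 1) = max slo a := by omega
          rw [h1]
        · -- here shi < a, so both clipped ranges are empty
          rw [PySem.List.pyRange_one_eq_nil (by omega),
              PySem.List.pyRange_one_eq_nil (by omega)]

-- ===== VERDICT (by name: the statement is the Claim_ definition above) =====
theorem solve_spec : Claim_equal_solve := by
  intro cp row rmin rmax ri _ _
  unfold Spec_solve solve solve_alt manhattanA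
  obtain ⟨⟨sx, sy⟩, bx, by_⟩ := cp
  simp only
  set half := |sx - bx| + |sy - by_| - |sy - ri| with hhalf
  have hbody : (fun (r : List Int) (x : Int) =>
      if |sx - x| + |sy - ri| ≤ |sx - bx| + |sy - by_| then
        if bx = x ∧ by_ = ri then r.set (x - rmin).toNat 0 else r.set (x - rmin).toNat 1
      else r)
    = (fun (r : List Int) (x : Int) =>
      if sx - half ≤ x ∧ x ≤ sx + half then
        r.set (x - rmin).toNat (if bx = x ∧ by_ = ri then 0 else 1)
      else r) := by
    funext r x
    have habs : (|sx - x| + |sy - ri| ≤ |sx - bx| + |sy - by_|) ↔ (sx - half ≤ x ∧ x ≤ sx + half) := by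
      rw [hhalf]
      rcases abs_cases (sx - x) with ⟨h1, h2⟩ | ⟨h1, h2⟩ <;> omega
    by_cases hc : |sx - x| + |sy - ri| ≤ |sx - bx| + |sy - by_|
    · rw [if_pos hc, if_pos (habs.mp hc)]
      by_cases hb : bx = x ∧ by_ = ri
      · rw [if_pos hb, if_pos hb]
      · rw [if_neg hb, if_neg hb]
    · rw [if_neg hc, if_neg (fun h => hc (habs.mpr h))]
  rw [hbody, fold_clip (sx - half) (sx + half) rmin _ (rmax - rmin).toNat rmin rmax (by omega) row]
  by_cases hneg : half < 0
  · rw [if_pos hneg, PySem.List.pyRange_one_eq_nil (by omega)]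
    rfl
  · rw [if_neg hneg]
    have hmin : min (sx + half) (rmax - 1) + 1 = min (sx + half + 1) rmax := by omega
    rw [hmin]
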